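-- pv_equiv track=rewrite | github.com/JozefTkocz/Strava-Summit-Reports | update_strava_description.py | create_strava_description
-- ===== SOURCE A (Python) =====
-- from typing import List, Union
--
-- def create_strava_description(reports: List[Union[str, None]]) -> Union[str, None]:
--     final_report = None
--
--     def append_reports(main_report: Union[str, None], sub_report: Union[str, None]) -> Union[str, None]:
--         if main_report is None:
--             return sub_report
--         elif sub_report is None and main_report is not None:
--             return main_report
--         else:
--             return main_report + '\n\n' + sub_report
--
--     for report in reports:
--         final_report = append_reports(final_report, report)
--
--     return final_report
-- ===== SOURCE B (Python) =====
-- from typing import List, Union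
--
--
-- def create_strava_description(reports: List[Union[str, None]]) -> Union[str, None]:
--     filtered = [r for r in reports if r is not None]
--     return '\n\n'.join(filtered) if filtered else None
-- ===== Notes on version B (the rewrite author's own statement) =====
-- stated objective: simpler
-- what changed: Replaces the accumulator-passing fold over a nested append_reports helper with a two-phase filter-then-join: collect the non-None reports, then one str.join, returning None when nothing survives.
import Mathlib
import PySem

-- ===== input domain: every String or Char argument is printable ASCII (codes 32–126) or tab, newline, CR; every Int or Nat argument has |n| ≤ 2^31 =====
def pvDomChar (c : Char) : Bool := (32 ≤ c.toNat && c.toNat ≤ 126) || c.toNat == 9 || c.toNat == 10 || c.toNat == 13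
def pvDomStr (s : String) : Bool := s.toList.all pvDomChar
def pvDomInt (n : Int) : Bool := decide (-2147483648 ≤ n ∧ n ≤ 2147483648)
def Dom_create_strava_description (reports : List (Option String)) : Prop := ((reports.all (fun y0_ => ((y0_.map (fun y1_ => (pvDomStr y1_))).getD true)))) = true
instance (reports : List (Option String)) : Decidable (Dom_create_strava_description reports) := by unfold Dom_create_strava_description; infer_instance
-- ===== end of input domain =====

-- B: filter-then-join decomposition instead of A's accumulator fold; equally fast, simpler.
-- ===== PORT A =====
-- nested helper append_reports, branch order as in A
def pvAppendReports (main_report : Option String) (sub_report : Option String) : Option String :=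
  if main_report.isNone then sub_report
  else if sub_report.isNone && !main_report.isNone then main_report
  else some (main_report.get! ++ "\n\n" ++ sub_report.get!)

def create_strava_description (reports : List (Option String)) : Option String :=
  reports.foldl pvAppendReports none

-- ===== PORT B =====
def create_strava_description_alt (reports : List (Option String)) : Option String :=
  let filtered := reports.filterMap id
  if filtered.isEmpty then none else some (PySem.Str.join "\n\n" filtered)

-- ===== PRECONDITION & SPEC =====
def Spec_create_strava_description (reports : List (Option String)) (out : Option String) : Prop := out = create_strava_description_alt reports
instance (reports : List (Option String)) (out : Option String) : Decidable (Spec_create_strava_description reports out) := by unfold Spec_create_strava_description; infer_instance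

-- ===== CLAIM (what is proved, stated in full; the proofs are below) =====
def Claim_equal_create_strava_description : Prop := ∀ (reports : List (Option String)), Dom_create_strava_description reports → Spec_create_strava_description reports (create_strava_description reports)

-- ===== LEMMAS AND PROOFS =====

theorem pvJoinStep (s t : String) (fl : List String) :
    PySem.Str.join "\n\n" ((s ++ "\n\n" ++ t) :: fl) = PySem.Str.join "\n\n" (s :: t :: fl) := by
  cases fl with
  | nil =>
    apply String.toList_inj.mp
    simp [PySem.Str.join, PySem.Chars.join_singleton, PySem.Chars.join_cons_cons]
  | cons c rest =>
    apply String.toList_inj.mp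
    simp [PySem.Str.join, PySem.Chars.join_cons_cons]

theorem pvFoldSome (l : List (Option String)) (s : String) :
    l.foldl pvAppendReports (some s) = some (PySem.Str.join "\n\n" (s :: l.filterMap id)) := by
  induction l generalizing s with
  | nil =>
    simp only [List.foldl_nil, List.filterMap_nil, Option.some_inj]
    apply String.toList_inj.mp
    simp [PySem.Str.join, PySem.Chars.join_singleton]
  | cons o rest ih =>
    cases o with
    | none =>
      have h1 : List.foldl pvAppendReports (some s) (none :: rest) =
          List.foldl pvAppendReports (some s) rest := rfl
      have h2 : (none :: rest).filterMap (id (α := Option String)) = rest.filterMap id := rfl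
      rw [h1, h2, ih]
    | some t =>
      have h1 : List.foldl pvAppendReports (some s) (some t :: rest) =
          List.foldl pvAppendReports (some (s ++ "\n\n" ++ t)) rest := rfl
      have h2 : (some t :: rest).filterMap (id (α := Option String)) = t :: rest.filterMap id := rfl
      rw [h1, h2, ih, pvJoinStep]

theorem pvFoldNone (l : List (Option String)) :
    l.foldl pvAppendReports none =
      match l.filterMap id with
      | [] => none
      | h :: t => some (PySem.Str.join "\n\n" (h :: t)) := by
  induction l with
  | nil => rfl
  | cons o rest ih =>
    cases o with
    | none =>
      have h1 : List.foldl pvAppendReports none (none :: rest) =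
          List.foldl pvAppendReports none rest := rfl
      have h2 : (none :: rest).filterMap (id (α := Option String)) = rest.filterMap id := rfl
      rw [h1, h2]
      exact ih
    | some t =>
      have h1 : List.foldl pvAppendReports none (some t :: rest) =
          List.foldl pvAppendReports (some t) rest := rfl
      have h2 : (some t :: rest).filterMap (id (α := Option String)) = t :: rest.filterMap id := rfl
      rw [h1, h2, pvFoldSome]

-- ===== VERDICT (by name: the statement is the Claim_ definition above) =====
theorem create_strava_description_spec : Claim_equal_create_strava_description := by
  intro reports _
  unfold Spec_create_strava_description create_strava_description create_strava_description_alt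
  rw [pvFoldNone]
  cases reports.filterMap id with
  | nil => rfl
  | cons a t => rfl
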